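-- pv_equiv track=rewrite | github.com/shahidhustles/accessibility-auditor | graders/accessibility_grader.py | match_violations
-- ===== SOURCE A (Python) =====
-- from typing import List, Tuple
--
-- def match_violations(found: List[dict], known: List[dict]) -> Tuple[int, int, int]:
--     """
--     Match found violations to known violations to identify true positives,
--     false positives, and false negatives.
--
--     Args:
--         found: List of violations found by the agent
--         known: List of ground truth violations
--
--     Returns:
--         Tuple of (true_positives, false_positives, false_negatives)
--     """
--     if not found and not known:
--         return 0, 0, 0
--
--     if not found:
--         return 0, 0, len(known)
--
--     if not known:
--         return 0, len(found), 0
--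
--     # Track which known violations have been matched
--     matched_known = set()
--     true_positives = 0
--
--     # Match by violation_id
--     for found_v in found:
--         found_id = found_v.get('violation_id', '')
--
--         for idx, known_v in enumerate(known):
--             if idx in matched_known:
--                 continue
--
--             known_id = known_v.get('violation_id', '')
--
--             # Match by violation_id
--             if found_id and known_id and found_id == known_id:
--                 true_positives += 1
--                 matched_known.add(idx)
--                 break
--
--             # Fallback: match by similar properties if violation_id not available
--             if not found_id or not known_id:
--                 found_html = found_v.get('element_html', '').strip()
--                 known_html = known_v.get('element_html', '').strip()
--                 found_type = found_v.get('type', '')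
--                 known_type = known_v.get('type', '')
--
--                 # Match if both type and element HTML are similar
--                 if (found_type and known_type and found_type == known_type and
--                     found_html and known_html and found_html == known_html):
--                     true_positives += 1
--                     matched_known.add(idx)
--                     break
--
--     false_positives = len(found) - true_positives
--     false_negatives = len(known) - true_positives
--
--     return true_positives, false_positives, false_negatives
-- ===== SOURCE B (Python) =====
-- from typing import List, Tuple
-- from collections import deque
--
--
-- def match_violations(found: List[dict], known: List[dict]) -> Tuple[int, int, int]:
--     """Index known violations by id and by (type, html) into ordered deques,
--     then give each found violation the earliest unmatched candidate: O(n + m)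
--     instead of A's O(n * m) rescans."""
--     by_id = {}        # id -> deque of indices of known with that (nonempty) id
--     by_th_empty = {}  # (type, html) -> deque of indices with EMPTY id
--     by_th_all = {}    # (type, html) -> deque of all indices with that type/html
--     for i, kv in enumerate(known):
--         kid = kv.get('violation_id', '')
--         kty = kv.get('type', '')
--         kth = kv.get('element_html', '').strip()
--         if kid:
--             by_id.setdefault(kid, deque()).append(i)
--         if kty and kth:
--             by_th_all.setdefault((kty, kth), deque()).append(i)
--             if not kid:
--                 by_th_empty.setdefault((kty, kth), deque()).append(i)
--
--     matched = set()
--     tp = 0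
--     for fv in found:
--         fid = fv.get('violation_id', '')
--         fty = fv.get('type', '')
--         fth = fv.get('element_html', '').strip()
--         if fid:
--             q1 = by_id.get(fid, deque())
--             while q1 and q1[0] in matched:   # drop stale entries
--                 q1.popleft()
--             if fty and fth:
--                 q2 = by_th_empty.get((fty, fth), deque())
--                 while q2 and q2[0] in matched:
--                     q2.popleft()
--                 if q1 and q2:
--                     q = q1 if q1[0] < q2[0] else q2
--                     matched.add(q.popleft()); tp += 1
--                 elif q1:
--                     matched.add(q1.popleft()); tp += 1
--                 elif q2:
--                     matched.add(q2.popleft()); tp += 1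
--             elif q1:
--                 matched.add(q1.popleft()); tp += 1
--         elif fty and fth:
--             q = by_th_all.get((fty, fth), deque())
--             while q and q[0] in matched:
--                 q.popleft()
--             if q:
--                 matched.add(q.popleft()); tp += 1
--     return tp, len(found) - tp, len(known) - tp
-- ===== Notes on version B (the rewrite author's own statement) =====
-- stated objective: faster
-- what changed: B builds one-pass indexes of the known violations (by violation_id, and by (type, stripped html) for empty-id and for all entries) as ordered queues and gives each found violation the earliest unmatched candidate by popping queue fronts with lazy deletion, replacing A's full rescan of the known list per found item.
import Mathlib
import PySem

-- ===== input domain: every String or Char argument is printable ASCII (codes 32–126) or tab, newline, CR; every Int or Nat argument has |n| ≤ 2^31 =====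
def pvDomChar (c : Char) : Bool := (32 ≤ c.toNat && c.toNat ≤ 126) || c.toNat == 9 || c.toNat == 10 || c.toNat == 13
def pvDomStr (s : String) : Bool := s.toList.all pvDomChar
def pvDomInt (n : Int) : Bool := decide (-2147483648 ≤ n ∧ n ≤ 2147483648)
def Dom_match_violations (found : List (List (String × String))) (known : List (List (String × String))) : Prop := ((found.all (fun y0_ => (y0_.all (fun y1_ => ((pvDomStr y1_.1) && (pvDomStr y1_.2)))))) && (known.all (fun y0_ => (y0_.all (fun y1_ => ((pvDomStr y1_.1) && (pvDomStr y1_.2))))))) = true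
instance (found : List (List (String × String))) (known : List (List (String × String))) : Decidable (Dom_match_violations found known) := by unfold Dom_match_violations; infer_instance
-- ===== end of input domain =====

-- B replaces A's per-found rescan of the whole known list by queues of known
-- indices built once (by id / by (type, stripped html)), popping the earliest
-- unmatched candidate per found item; return values proved equal.

-- shared leaf helper: Python dict.get(k, '') on a dict given as an assoc list
def dget (kv : List (String × String)) (k : String) : String :=
  (PySem.Dict.ofList kv).getD k ""

-- ===== PORT A =====
-- inner loop of A: 'for idx, known_v in enumerate(known): …' (break on match)
def aScan (fv : List (String × String)) (fid : String) :
    List (Int × List (String × String)) → PySem.Set Int → Int → PySem.Set Int × Int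
  | [], S, tp => (S, tp)
  | (idx, kv) :: rest, S, tp =>
    if S.contains idx then aScan fv fid rest S tp
    else
      let kid := dget kv "violation_id"
      if fid ≠ "" ∧ kid ≠ "" ∧ fid = kid then (S.add idx, tp + 1)
      else if fid = "" ∨ kid = "" then
        let fh := PySem.Str.strip (dget fv "element_html")
        let kh := PySem.Str.strip (dget kv "element_html")
        let ft := dget fv "type"
        let kt := dget kv "type"
        if ft ≠ "" ∧ kt ≠ "" ∧ ft = kt ∧ fh ≠ "" ∧ kh ≠ "" ∧ fh = kh then (S.add idx, tp + 1)
        else aScan fv fid rest S tp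
      else aScan fv fid rest S tp

def match_violations (found : List (List (String × String))) (known : List (List (String × String))) : Int × Int × Int :=
  if found = [] ∧ known = [] then (0, 0, 0)
  else if found = [] then (0, 0, (known.length : Int))
  else if known = [] then (0, (found.length : Int), 0)
  else
    let st := found.foldl
      (fun (st : PySem.Set Int × Int) fv =>
        aScan fv (dget fv "violation_id") (PySem.List.enumerate known 0) st.1 st.2)
      (PySem.Set.empty, 0)
    (st.2, (found.length : Int) - st.2, (known.length : Int) - st.2)

-- ===== PORT B =====
structure BSt where
  byId : PySem.Dict String (List Int)
  byE : PySem.Dict (String × String) (List Int)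
  byA : PySem.Dict (String × String) (List Int)
  matched : PySem.Set Int
  tp : Int
deriving Repr

-- one step of B's index build ('setdefault(k, deque()).append(i)' = modify k [] (· ++ [i]))
def bBuild (d : PySem.Dict String (List Int) × PySem.Dict (String × String) (List Int) × PySem.Dict (String × String) (List Int))
    (p : Int × List (String × String)) :
    PySem.Dict String (List Int) × PySem.Dict (String × String) (List Int) × PySem.Dict (String × String) (List Int) :=
  let kid := dget p.2 "violation_id"
  let kty := dget p.2 "type"
  let kth := PySem.Str.strip (dget p.2 "element_html")
  let d1 := if kid ≠ "" then d.1.modify kid [] (· ++ [p.1]) else d.1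
  let d2 := if kty ≠ "" ∧ kth ≠ "" ∧ kid = "" then d.2.1.modify (kty, kth) [] (· ++ [p.1]) else d.2.1
  let d3 := if kty ≠ "" ∧ kth ≠ "" then d.2.2.modify (kty, kth) [] (· ++ [p.1]) else d.2.2
  (d1, d2, d3)

-- 'while q and q[0] in matched: q.popleft()'
def clean (S : PySem.Set Int) : List Int → List Int
  | [] => []
  | i :: t => if S.contains i then clean S t else i :: t

-- one step of B's main loop over found
def bStep (st : BSt) (fv : List (String × String)) : BSt :=
  let fid := dget fv "violation_id"
  let fty := dget fv "type"
  let fth := PySem.Str.strip (dget fv "element_html")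
  if fid ≠ "" then
    let q1 := clean st.matched (st.byId.getD fid [])
    if fty ≠ "" ∧ fth ≠ "" then
      let q2 := clean st.matched (st.byE.getD (fty, fth) [])
      match q1, q2 with
      | i1 :: t1, i2 :: t2 =>
        if i1 < i2 then
          { st with byId := st.byId.insert fid t1, byE := st.byE.insert (fty, fth) q2,
                    matched := st.matched.add i1, tp := st.tp + 1 }
        else
          { st with byId := st.byId.insert fid q1, byE := st.byE.insert (fty, fth) t2,
                    matched := st.matched.add i2, tp := st.tp + 1 }
      | i1 :: t1, [] =>
        { st with byId := st.byId.insert fid t1, byE := st.byE.insert (fty, fth) [],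
                  matched := st.matched.add i1, tp := st.tp + 1 }
      | [], i2 :: t2 =>
        { st with byId := st.byId.insert fid [], byE := st.byE.insert (fty, fth) t2,
                  matched := st.matched.add i2, tp := st.tp + 1 }
      | [], [] =>
        { st with byId := st.byId.insert fid [], byE := st.byE.insert (fty, fth) [] }
    else
      match q1 with
      | i1 :: t1 => { st with byId := st.byId.insert fid t1, matched := st.matched.add i1, tp := st.tp + 1 }
      | [] => { st with byId := st.byId.insert fid [] }
  else if fty ≠ "" ∧ fth ≠ "" then
    let q := clean st.matched (st.byA.getD (fty, fth) [])
    match q with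
    | i :: t => { st with byA := st.byA.insert (fty, fth) t, matched := st.matched.add i, tp := st.tp + 1 }
    | [] => { st with byA := st.byA.insert (fty, fth) [] }
  else st

def match_violations_alt (found : List (List (String × String))) (known : List (List (String × String))) : Int × Int × Int :=
  let d := (PySem.List.enumerate known 0).foldl bBuild (PySem.Dict.empty, PySem.Dict.empty, PySem.Dict.empty)
  let st := found.foldl bStep ⟨d.1, d.2.1, d.2.2, PySem.Set.empty, 0⟩
  (st.tp, (found.length : Int) - st.tp, (known.length : Int) - st.tp)

-- ===== PRECONDITION & SPEC =====
def Spec_match_violations (found : List (List (String × String))) (known : List (List (String × String))) (out : Int × Int × Int) : Prop := out = match_violations_alt found known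
instance (found : List (List (String × String))) (known : List (List (String × String))) (out : Int × Int × Int) : Decidable (Spec_match_violations found known out) := by unfold Spec_match_violations; infer_instance

-- ===== CLAIM (what is proved, stated in full; the proofs are below) =====
def Claim_equal_match_violations : Prop := ∀ (found : List (List (String × String))) (known : List (List (String × String))), Dom_match_violations found known → Spec_match_violations found known (match_violations found known)

-- ===== LEMMAS AND PROOFS =====

-- key data of a known entry at index j
def kd (known : List (List (String × String))) (j : Int) : String × String × String :=
  let kv := PySem.List.pyGetD known j []
  (dget kv "violation_id", dget kv "type", PySem.Str.strip (dget kv "element_html"))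

def fd (fv : List (String × String)) : String × String × String :=
  (dget fv "violation_id", dget fv "type", PySem.Str.strip (dget fv "element_html"))

-- A's per-pair match predicate, as a Bool on key data
def mB (f k : String × String × String) : Bool :=
  (f.1 ≠ "" ∧ k.1 ≠ "" ∧ f.1 = k.1) ∨
  ((f.1 = "" ∨ k.1 = "") ∧ f.2.1 ≠ "" ∧ k.2.1 ≠ "" ∧ f.2.1 = k.2.1 ∧ f.2.2 ≠ "" ∧ k.2.2 ≠ "" ∧ f.2.2 = k.2.2)

-- the three queue-membership predicates (index sets of the three dicts)
def P1 (known : List (List (String × String))) (s : String) (j : Int) : Prop :=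
  j ∈ PySem.List.pyRange 0 (known.length : Int) 1 ∧ (kd known j).1 = s ∧ s ≠ ""
def P2 (known : List (List (String × String))) (t h : String) (j : Int) : Prop :=
  j ∈ PySem.List.pyRange 0 (known.length : Int) 1 ∧ (kd known j).1 = "" ∧ (kd known j).2.1 = t ∧ (kd known j).2.2 = h ∧ t ≠ "" ∧ h ≠ ""
def P3 (known : List (List (String × String))) (t h : String) (j : Int) : Prop :=
  j ∈ PySem.List.pyRange 0 (known.length : Int) 1 ∧ (kd known j).2.1 = t ∧ (kd known j).2.2 = h ∧ t ≠ "" ∧ h ≠ ""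

-- queue invariant: sorted, all members satisfy P, and every unmatched P-index is present
def QI (S : PySem.Set Int) (P : Int → Prop) (q : List Int) : Prop :=
  q.Pairwise (· < ·) ∧ (∀ i ∈ q, P i) ∧ (∀ i, P i → i ∉ S → i ∈ q)

def DInv (known : List (List (String × String))) (S : PySem.Set Int)
    (d1 : PySem.Dict String (List Int)) (d2 d3 : PySem.Dict (String × String) (List Int)) : Prop :=
  (∀ s, QI S (P1 known s) (d1.getD s [])) ∧
  (∀ t h, QI S (P2 known t h) (d2.getD (t, h) [])) ∧
  (∀ t h, QI S (P3 known t h) (d3.getD (t, h) []))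


-- clean S q is a suffix of q
lemma clean_suffix (S : PySem.Set Int) : ∀ q : List Int, (clean S q).IsSuffix q := by
  intro q
  induction q with
  | nil => simp [clean]
  | cons i t ih =>
    simp only [clean]
    split
    · exact (ih).trans (List.suffix_cons i t)
    · exact List.suffix_refl _

lemma mem_of_mem_clean {S : PySem.Set Int} {q : List Int} {i : Int} (h : i ∈ clean S q) : i ∈ q :=
  (clean_suffix S q).subset h

lemma mem_clean_of_not_mem {S : PySem.Set Int} {q : List Int} {i : Int}
    (hq : i ∈ q) (hS : i ∉ S) : i ∈ clean S q := by
  induction q with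
  | nil => simp at hq
  | cons a t ih =>
    simp only [clean]
    split
    · rename_i hc
      rcases List.mem_cons.mp hq with rfl | hmem
      · exact absurd ((PySem.Set.contains_iff _ _).mp hc) hS
      · exact ih hmem
    · exact hq

lemma head_clean_not_mem {S : PySem.Set Int} {q : List Int} {i : Int} {t : List Int}
    (h : clean S q = i :: t) : i ∉ S := by
  induction q with
  | nil => simp [clean] at h
  | cons a r ih =>
    simp only [clean] at h
    split at h
    · exact ih h
    · rename_i hc
      cases h
      intro hmem
      exact hc ((PySem.Set.contains_iff _ _).mpr hmem)

lemma QI_clean {S : PySem.Set Int} {P : Int → Prop} {q : List Int} (h : QI S P q) :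
    QI S P (clean S q) := by
  obtain ⟨h1, h2, h3⟩ := h
  exact ⟨h1.sublist (clean_suffix S q).sublist,
    fun i hi => h2 i (mem_of_mem_clean hi),
    fun i hP hS => mem_clean_of_not_mem (h3 i hP hS) hS⟩

lemma QI_mono {S S' : PySem.Set Int} {P : Int → Prop} {q : List Int} (h : QI S P q)
    (hsub : ∀ i : Int, i ∉ S' → i ∉ S) : QI S' P q :=
  ⟨h.1, h.2.1, fun i hP hS => h.2.2 i hP (hsub i hS)⟩

lemma not_mem_add {S : PySem.Set Int} {i j : Int} (h : i ∉ PySem.Set.add S j) : i ∉ S := by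
  intro hm
  exact h ((PySem.Set.mem_add _ _ _).mpr (Or.inl hm))

lemma QI_add {S : PySem.Set Int} {P : Int → Prop} {q : List Int} (h : QI S P q) (j : Int) :
    QI (PySem.Set.add S j) P q :=
  QI_mono h (fun _ hi => not_mem_add hi)

-- after popping the head of a cleaned queue, the tail is a valid queue for S.add i
lemma QI_tail {S : PySem.Set Int} {P : Int → Prop} {q : List Int} {i : Int} {t : List Int}
    (h : QI S P q) (hc : clean S q = i :: t) : QI (PySem.Set.add S i) P t := by
  have hcl : QI S P (clean S q) := QI_clean h
  rw [hc] at hcl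
  obtain ⟨h1, h2, h3⟩ := hcl
  refine ⟨h1.sublist (List.sublist_cons_self i t), fun x hx => h2 x (List.mem_cons_of_mem _ hx), ?_⟩
  intro x hP hS
  have hxS : x ∉ S := not_mem_add hS
  have hx : x ∈ i :: t := h3 x hP hxS
  rcases List.mem_cons.mp hx with rfl | hmem
  · exact absurd ((PySem.Set.mem_add _ _ _).mpr (Or.inr rfl)) hS
  · exact hmem

-- the head of a cleaned queue is the LEAST unmatched index satisfying P
lemma clean_head_least {S : PySem.Set Int} {P : Int → Prop} {q : List Int} {i : Int} {t : List Int}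
    (h : QI S P q) (hc : clean S q = i :: t) :
    P i ∧ i ∉ S ∧ ∀ j, P j → j ∉ S → i ≤ j := by
  have hcl : QI S P (clean S q) := QI_clean h
  rw [hc] at hcl
  refine ⟨hcl.2.1 i (List.mem_cons_self), head_clean_not_mem hc, ?_⟩
  intro j hP hS
  have hj : j ∈ i :: t := hcl.2.2 j hP hS
  rcases List.mem_cons.mp hj with rfl | hmem
  · exact le_refl _
  · exact le_of_lt (List.rel_of_pairwise_cons hcl.1 hmem)

lemma clean_nil_no_match {S : PySem.Set Int} {P : Int → Prop} {q : List Int}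
    (h : QI S P q) (hc : clean S q = []) : ∀ j, P j → j ∉ S → False := by
  intro j hP hS
  have := (QI_clean h).2.2 j hP hS
  rw [hc] at this
  simp at this

-- find? on a strictly increasing list returns the least element satisfying p
lemma find?_least_some {l : List Int} {p : Int → Bool} {i : Int}
    (hp : l.Pairwise (· < ·)) (h : l.find? p = some i) :
    p i = true ∧ i ∈ l ∧ ∀ j ∈ l, p j = true → i ≤ j := by
  induction l with
  | nil => simp at h
  | cons a t ih =>
    by_cases ha : p a = true
    · rw [List.find?_cons_of_pos ha] at h
      cases h
      refine ⟨ha, List.mem_cons_self, ?_⟩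
      intro j hj _
      rcases List.mem_cons.mp hj with rfl | hmem
      · exact le_refl _
      · exact le_of_lt (List.rel_of_pairwise_cons hp hmem)
    · rw [List.find?_cons_of_neg ha] at h
      obtain ⟨h1, h2, h3⟩ := ih (List.Pairwise.of_cons hp) h
      refine ⟨h1, List.mem_cons_of_mem _ h2, ?_⟩
      intro j hj hpj
      rcases List.mem_cons.mp hj with rfl | hmem
      · exact absurd hpj ha
      · exact h3 j hmem hpj

lemma find?_eq_some_of_least {l : List Int} {p : Int → Bool} {i : Int}
    (hp : l.Pairwise (· < ·)) (hi : i ∈ l) (hpi : p i = true)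
    (hmin : ∀ j ∈ l, p j = true → i ≤ j) : l.find? p = some i := by
  cases h : l.find? p with
  | none =>
    exact absurd hpi (by simpa using List.find?_eq_none.mp h i hi)
  | some i' =>
    obtain ⟨h1, h2, h3⟩ := find?_least_some hp h
    exact congrArg some (le_antisymm (hmin i' h2 h1) (h3 i hi hpi)).symm


-- A's inner loop is a find? over the enumerated known list
lemma aScan_eq (fv : List (String × String)) (l : List (Int × List (String × String)))
    (S : PySem.Set Int) (tp : Int) :
    aScan fv (dget fv "violation_id") l S tp =
      match l.find? (fun p => !S.contains p.1 &&
          mB (fd fv) (dget p.2 "violation_id", dget p.2 "type", PySem.Str.strip (dget p.2 "element_html"))) with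
      | none => (S, tp)
      | some p => (S.add p.1, tp + 1) := by
  induction l with
  | nil => simp [aScan]
  | cons p rest ih =>
    obtain ⟨idx, kv⟩ := p
    by_cases hc : idx ∈ S
    · have hcon : S.contains idx = true := (PySem.Set.contains_iff _ _).mpr hc
      simp [aScan, hc, ih]
    · have hcon : S.contains idx = false := by
        by_contra h
        exact hc ((PySem.Set.contains_iff _ _).mp (by revert h; cases S.contains idx <;> simp))
      by_cases h1 : dget fv "violation_id" ≠ "" ∧ dget kv "violation_id" ≠ "" ∧ dget fv "violation_id" = dget kv "violation_id"
      · simp [aScan, hc, h1, mB, fd]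
      · by_cases h2 : dget fv "violation_id" = "" ∨ dget kv "violation_id" = ""
        · by_cases h3 : dget fv "type" ≠ "" ∧ dget kv "type" ≠ "" ∧ dget fv "type" = dget kv "type" ∧
              PySem.Str.strip (dget fv "element_html") ≠ "" ∧ PySem.Str.strip (dget kv "element_html") ≠ "" ∧
              PySem.Str.strip (dget fv "element_html") = PySem.Str.strip (dget kv "element_html")
          · simp [aScan, hc, h1, h2, h3, mB, fd]
          · simp [aScan, hc, h1, h2, h3, mB, fd, ih]
        · simp [aScan, hc, h1, h2, mB, fd, ih]


-- closed form of the three indexes built by B's first pass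
lemma build_getD1 (l : List (Int × List (String × String)))
    (d : PySem.Dict String (List Int) × PySem.Dict (String × String) (List Int) × PySem.Dict (String × String) (List Int))
    (s : String) :
    ((l.foldl bBuild d).1).getD s [] =
      d.1.getD s [] ++ (l.filter (fun p => dget p.2 "violation_id" ≠ "" ∧ dget p.2 "violation_id" = s)).map (·.1) := by
  induction l generalizing d with
  | nil => simp
  | cons p rest ih =>
    rw [List.foldl_cons, ih]
    have hb : (bBuild d p).1.getD s [] =
        d.1.getD s [] ++ (if dget p.2 "violation_id" ≠ "" ∧ dget p.2 "violation_id" = s then [p.1] else []) := by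
      by_cases h : dget p.2 "violation_id" ≠ ""
      · simp only [bBuild]
        rw [if_pos h, PySem.Dict.getD_modify]
        by_cases hs : dget p.2 "violation_id" = s
        · subst hs
          simp [h]
        · rw [if_neg (fun hse => hs hse.symm), if_neg (fun hc => hs hc.2)]
          simp
      · simp only [bBuild]
        rw [if_neg h, if_neg (fun hc => h hc.1)]
        simp
    rw [hb]
    by_cases hq : dget p.2 "violation_id" ≠ "" ∧ dget p.2 "violation_id" = s
    · rw [if_pos hq, List.filter_cons_of_pos (by simpa using hq), List.map_cons]
      simp [List.append_assoc]
    · rw [if_neg hq, List.filter_cons_of_neg (by simpa using hq)]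
      simp

lemma build_getD2 (l : List (Int × List (String × String)))
    (d : PySem.Dict String (List Int) × PySem.Dict (String × String) (List Int) × PySem.Dict (String × String) (List Int))
    (t h : String) :
    ((l.foldl bBuild d).2.1).getD (t, h) [] =
      d.2.1.getD (t, h) [] ++ (l.filter (fun p => dget p.2 "type" ≠ "" ∧ PySem.Str.strip (dget p.2 "element_html") ≠ "" ∧ dget p.2 "violation_id" = "" ∧ dget p.2 "type" = t ∧ PySem.Str.strip (dget p.2 "element_html") = h)).map (·.1) := by
  induction l generalizing d with
  | nil => simp
  | cons p rest ih =>
    rw [List.foldl_cons, ih]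
    have hb : (bBuild d p).2.1.getD (t, h) [] =
        d.2.1.getD (t, h) [] ++ (if dget p.2 "type" ≠ "" ∧ PySem.Str.strip (dget p.2 "element_html") ≠ "" ∧ dget p.2 "violation_id" = "" ∧ dget p.2 "type" = t ∧ PySem.Str.strip (dget p.2 "element_html") = h then [p.1] else []) := by
      by_cases hg : dget p.2 "type" ≠ "" ∧ PySem.Str.strip (dget p.2 "element_html") ≠ "" ∧ dget p.2 "violation_id" = ""
      · simp only [bBuild]
        rw [if_pos hg, PySem.Dict.getD_modify]
        by_cases hk : (t, h) = (dget p.2 "type", PySem.Str.strip (dget p.2 "element_html"))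
        · rw [if_pos hk, if_pos ⟨hg.1, hg.2.1, hg.2.2, (congrArg Prod.fst hk).symm, (congrArg Prod.snd hk).symm⟩]
          have ht : dget p.2 "type" = t := (congrArg Prod.fst hk).symm
          have hh2 : PySem.Str.strip (dget p.2 "element_html") = h := (congrArg Prod.snd hk).symm
          rw [ht, hh2]
        · rw [if_neg hk, if_neg (fun hc => hk (by rw [hc.2.2.2.1, hc.2.2.2.2]))]
          simp
      · simp only [bBuild]
        rw [if_neg hg, if_neg (fun hc => hg ⟨hc.1, hc.2.1, hc.2.2.1⟩)]
        simp
    rw [hb]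
    by_cases hq : dget p.2 "type" ≠ "" ∧ PySem.Str.strip (dget p.2 "element_html") ≠ "" ∧ dget p.2 "violation_id" = "" ∧ dget p.2 "type" = t ∧ PySem.Str.strip (dget p.2 "element_html") = h
    · rw [if_pos hq, List.filter_cons_of_pos (by simpa using hq), List.map_cons]
      simp [List.append_assoc]
    · rw [if_neg hq, List.filter_cons_of_neg (by simpa using hq)]
      simp

lemma build_getD3 (l : List (Int × List (String × String)))
    (d : PySem.Dict String (List Int) × PySem.Dict (String × String) (List Int) × PySem.Dict (String × String) (List Int))
    (t h : String) :
    ((l.foldl bBuild d).2.2).getD (t, h) [] =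
      d.2.2.getD (t, h) [] ++ (l.filter (fun p => dget p.2 "type" ≠ "" ∧ PySem.Str.strip (dget p.2 "element_html") ≠ "" ∧ dget p.2 "type" = t ∧ PySem.Str.strip (dget p.2 "element_html") = h)).map (·.1) := by
  induction l generalizing d with
  | nil => simp
  | cons p rest ih =>
    rw [List.foldl_cons, ih]
    have hb : (bBuild d p).2.2.getD (t, h) [] =
        d.2.2.getD (t, h) [] ++ (if dget p.2 "type" ≠ "" ∧ PySem.Str.strip (dget p.2 "element_html") ≠ "" ∧ dget p.2 "type" = t ∧ PySem.Str.strip (dget p.2 "element_html") = h then [p.1] else []) := by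
      by_cases hg : dget p.2 "type" ≠ "" ∧ PySem.Str.strip (dget p.2 "element_html") ≠ ""
      · simp only [bBuild]
        rw [if_pos hg, PySem.Dict.getD_modify]
        by_cases hk : (t, h) = (dget p.2 "type", PySem.Str.strip (dget p.2 "element_html"))
        · rw [if_pos hk, if_pos ⟨hg.1, hg.2, (congrArg Prod.fst hk).symm, (congrArg Prod.snd hk).symm⟩]
          have ht : dget p.2 "type" = t := (congrArg Prod.fst hk).symm
          have hh2 : PySem.Str.strip (dget p.2 "element_html") = h := (congrArg Prod.snd hk).symm
          rw [ht, hh2]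
        · rw [if_neg hk, if_neg (fun hc => hk (by rw [hc.2.2.1, hc.2.2.2]))]
          simp
      · simp only [bBuild]
        rw [if_neg hg, if_neg (fun hc => hg ⟨hc.1, hc.2.1⟩)]
        simp
    rw [hb]
    by_cases hq : dget p.2 "type" ≠ "" ∧ PySem.Str.strip (dget p.2 "element_html") ≠ "" ∧ dget p.2 "type" = t ∧ PySem.Str.strip (dget p.2 "element_html") = h
    · rw [if_pos hq, List.filter_cons_of_pos (by simpa using hq), List.map_cons]
      simp [List.append_assoc]
    · rw [if_neg hq, List.filter_cons_of_neg (by simpa using hq)]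
      simp


lemma filter_enum (known : List (List (String × String))) (pred : Int × List (String × String) → Bool) :
    ((PySem.List.enumerate known 0).filter pred).map (·.1)
      = (PySem.List.pyRange 0 (known.length : Int) 1).filter (fun j => pred (j, PySem.List.pyGetD known j [])) := by
  rw [PySem.List.enumerate_eq_map_pyRange (d := []), List.filter_map, List.map_map]
  simp [Function.comp_def]

lemma QI_of_filter {p : Int → Bool} {P : Int → Prop} {m : Int}
    (hiff : ∀ j, P j ↔ j ∈ PySem.List.pyRange 0 m 1 ∧ p j = true) :
    QI PySem.Set.empty P ((PySem.List.pyRange 0 m 1).filter p) := by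
  refine ⟨(PySem.List.pairwise_lt_pyRange_one 0 m).filter p, ?_, ?_⟩
  · intro i hi
    rw [List.mem_filter] at hi
    exact (hiff i).mpr hi
  · intro i hP _
    rw [List.mem_filter]
    exact (hiff i).mp hP

lemma DInv_init (known : List (List (String × String))) :
    DInv known PySem.Set.empty
      ((PySem.List.enumerate known 0).foldl bBuild (PySem.Dict.empty, PySem.Dict.empty, PySem.Dict.empty)).1
      ((PySem.List.enumerate known 0).foldl bBuild (PySem.Dict.empty, PySem.Dict.empty, PySem.Dict.empty)).2.1
      ((PySem.List.enumerate known 0).foldl bBuild (PySem.Dict.empty, PySem.Dict.empty, PySem.Dict.empty)).2.2 := by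
  refine ⟨?_, ?_, ?_⟩
  · intro s
    rw [build_getD1, PySem.Dict.getD_empty, List.nil_append, filter_enum]
    apply QI_of_filter
    intro j
    unfold P1 kd
    simp only [decide_eq_true_eq]
    constructor
    · rintro ⟨hR, h1, h2⟩
      exact ⟨hR, fun hc => h2 (h1 ▸ hc), h1⟩
    · rintro ⟨hR, h1, h2⟩
      exact ⟨hR, h2, fun hc => h1 (h2.symm ▸ hc)⟩
  · intro t h
    rw [build_getD2, PySem.Dict.getD_empty, List.nil_append, filter_enum]
    apply QI_of_filter
    intro j
    unfold P2 kd
    simp only [decide_eq_true_eq]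
    constructor
    · rintro ⟨hR, h1, h2, h3, h4, h5⟩
      exact ⟨hR, fun hc => h4 (h2 ▸ hc), fun hc => h5 (h3 ▸ hc), h1, h2, h3⟩
    · rintro ⟨hR, h1, h2, h3, h4, h5⟩
      exact ⟨hR, h3, h4, h5, fun hc => h1 (h4.symm ▸ hc), fun hc => h2 (h5.symm ▸ hc)⟩
  · intro t h
    rw [build_getD3, PySem.Dict.getD_empty, List.nil_append, filter_enum]
    apply QI_of_filter
    intro j
    unfold P3 kd
    simp only [decide_eq_true_eq]
    constructor
    · rintro ⟨hR, h1, h2, h3, h4⟩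
      exact ⟨hR, fun hc => h3 (h1 ▸ hc), fun hc => h4 (h2 ▸ hc), h1, h2⟩
    · rintro ⟨hR, h1, h2, h3, h4⟩
      exact ⟨hR, h3, h4, fun hc => h1 (h3.symm ▸ hc), fun hc => h2 (h4.symm ▸ hc)⟩


lemma not_contains_iff {S : PySem.Set Int} {j : Int} : (!S.contains j) = true ↔ j ∉ S := by
  constructor
  · intro h hm
    rw [(PySem.Set.contains_iff _ _).mpr hm] at h
    simp at h
  · intro h
    cases hc : S.contains j
    · rfl
    · exact absurd ((PySem.Set.contains_iff _ _).mp hc) h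

lemma mB_case1 {f k : String × String × String} (hfid : f.1 ≠ "") (hft : f.2.1 ≠ "" ∧ f.2.2 ≠ "") :
    mB f k = true ↔ (k.1 = f.1 ∨ (k.1 = "" ∧ k.2.1 = f.2.1 ∧ k.2.2 = f.2.2)) := by
  simp only [mB, decide_eq_true_eq]
  constructor
  · rintro (⟨_, _, h⟩ | ⟨hor, _, _, h1, _, _, h2⟩)
    · exact Or.inl h.symm
    · rcases hor with hf | hk
      · exact absurd hf hfid
      · exact Or.inr ⟨hk, h1.symm, h2.symm⟩
  · rintro (h | ⟨h0, h1, h2⟩)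
    · exact Or.inl ⟨hfid, h ▸ hfid, h.symm⟩
    · exact Or.inr ⟨Or.inr h0, hft.1, h1 ▸ hft.1, h1.symm, hft.2, h2 ▸ hft.2, h2.symm⟩

lemma mB_case2 {f k : String × String × String} (hfid : f.1 ≠ "") (hft : ¬(f.2.1 ≠ "" ∧ f.2.2 ≠ "")) :
    mB f k = true ↔ k.1 = f.1 := by
  simp only [mB, decide_eq_true_eq]
  constructor
  · rintro (⟨_, _, h⟩ | ⟨_, h1, _, _, h2, _, _⟩)
    · exact h.symm
    · exact absurd ⟨h1, h2⟩ hft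
  · intro h
    exact Or.inl ⟨hfid, h ▸ hfid, h.symm⟩

lemma mB_case3 {f k : String × String × String} (hfid : f.1 = "") (hft : f.2.1 ≠ "" ∧ f.2.2 ≠ "") :
    mB f k = true ↔ (k.2.1 = f.2.1 ∧ k.2.2 = f.2.2) := by
  simp only [mB, decide_eq_true_eq]
  constructor
  · rintro (⟨h, _, _⟩ | ⟨_, _, _, h1, _, _, h2⟩)
    · exact absurd hfid h
    · exact ⟨h1.symm, h2.symm⟩
  · rintro ⟨h1, h2⟩
    exact Or.inr ⟨Or.inl hfid, hft.1, h1 ▸ hft.1, h1.symm, hft.2, h2 ▸ hft.2, h2.symm⟩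

lemma mB_case4 {f k : String × String × String} (hfid : f.1 = "") (hft : ¬(f.2.1 ≠ "" ∧ f.2.2 ≠ "")) :
    mB f k = false := by
  rw [Bool.eq_false_iff]
  intro hc
  simp only [mB, decide_eq_true_eq] at hc
  rcases hc with ⟨h, _, _⟩ | ⟨_, h1, _, _, h2, _, _⟩
  · exact h hfid
  · exact hft ⟨h1, h2⟩


lemma step_agree (known : List (List (String × String))) (fv : List (String × String)) (st : BSt)
    (hI : DInv known st.matched st.byId st.byE st.byA) :
    (bStep st fv).matched = (aScan fv (dget fv "violation_id") (PySem.List.enumerate known 0) st.matched st.tp).1 ∧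
    (bStep st fv).tp = (aScan fv (dget fv "violation_id") (PySem.List.enumerate known 0) st.matched st.tp).2 ∧
    DInv known (bStep st fv).matched (bStep st fv).byId (bStep st fv).byE (bStep st fv).byA := by
  rw [aScan_eq, PySem.List.enumerate_eq_map_pyRange (d := []), List.find?_map]
  have hcomp : ((fun p : Int × List (String × String) => !st.matched.contains p.1 && mB (fd fv) (dget p.2 "violation_id", dget p.2 "type", PySem.Str.strip (dget p.2 "element_html"))) ∘ (fun j : Int => (j, PySem.List.pyGetD known j []))) = fun j : Int => !st.matched.contains j && mB (fd fv) (kd known j) := rfl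
  rw [hcomp, show PySem.List.len known = (known.length : Int) from PySem.List.len_eq known]
  have hq_iff : ∀ j : Int, ((!st.matched.contains j && mB (fd fv) (kd known j)) = true) ↔ (j ∉ st.matched ∧ mB (fd fv) (kd known j) = true) := by
    intro j
    rw [Bool.and_eq_true, not_contains_iff]
  by_cases hfid : dget fv "violation_id" ≠ ""
  · by_cases hft : dget fv "type" ≠ "" ∧ PySem.Str.strip (dget fv "element_html") ≠ ""
    · simp only [bStep]
      rw [if_pos hfid, if_pos hft]
      rcases hq1 : clean st.matched (st.byId.getD (dget fv "violation_id") []) with _ | ⟨i1, t1⟩ <;>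
        rcases hq2 : clean st.matched (st.byE.getD (dget fv "type", PySem.Str.strip (dget fv "element_html")) []) with _ | ⟨i2, t2⟩
      · -- no candidate in either queue
        have hfind : List.find? (fun j => !st.matched.contains j && mB (fd fv) (kd known j)) (PySem.List.pyRange 0 (known.length : Int)) = none := by
          apply List.find?_eq_none.mpr
          intro j hj hpj
          rw [hq_iff] at hpj
          obtain ⟨hjS, hjm⟩ := hpj
          rcases (mB_case1 hfid hft).mp hjm with h | h
          · exact clean_nil_no_match (hI.1 (dget fv "violation_id")) hq1 j ⟨hj, h, hfid⟩ hjS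
          · exact clean_nil_no_match (hI.2.1 _ _) hq2 j ⟨hj, h.1, h.2.1, h.2.2, hft.1, hft.2⟩ hjS
        rw [hfind]
        dsimp only
        refine ⟨rfl, rfl, ?_, ?_, ?_⟩
        · intro s
          rw [PySem.Dict.getD_insert]
          split
          · rename_i h
            subst h
            have := QI_clean (hI.1 (dget fv "violation_id"))
            rw [hq1] at this
            exact this
          · exact hI.1 s
        · intro t h
          rw [PySem.Dict.getD_insert]
          split
          · rename_i he
            rw [Prod.mk.injEq] at he
            obtain ⟨h1, h2⟩ := he
            subst h1; subst h2
            have := QI_clean (hI.2.1 (dget fv "type") (PySem.Str.strip (dget fv "element_html")))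
            rw [hq2] at this
            exact this
          · exact hI.2.1 t h
        · exact hI.2.2
      · -- only the (type,html) queue has a candidate: i2
        have hl2 := clean_head_least (hI.2.1 (dget fv "type") (PySem.Str.strip (dget fv "element_html"))) hq2
        have hfind : List.find? (fun j => !st.matched.contains j && mB (fd fv) (kd known j)) (PySem.List.pyRange 0 (known.length : Int)) = some i2 := by
          apply find?_eq_some_of_least (PySem.List.pairwise_lt_pyRange_one _ _) hl2.1.1
          · rw [hq_iff]
            exact ⟨hl2.2.1, (mB_case1 hfid hft).mpr (Or.inr ⟨hl2.1.2.1, hl2.1.2.2.1, hl2.1.2.2.2.1⟩)⟩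
          · intro j hj hpj
            rw [hq_iff] at hpj
            obtain ⟨hjS, hjm⟩ := hpj
            rcases (mB_case1 hfid hft).mp hjm with h | h
            · exact (clean_nil_no_match (hI.1 (dget fv "violation_id")) hq1 j ⟨hj, h, hfid⟩ hjS).elim
            · exact hl2.2.2 j ⟨hj, h.1, h.2.1, h.2.2, hft.1, hft.2⟩ hjS
        rw [hfind]
        dsimp only
        refine ⟨rfl, rfl, ?_, ?_, ?_⟩
        · intro s
          rw [PySem.Dict.getD_insert]
          split
          · rename_i h
            subst h
            have := QI_clean (hI.1 (dget fv "violation_id"))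
            rw [hq1] at this
            exact QI_add this i2
          · exact QI_add (hI.1 s) i2
        · intro t h
          rw [PySem.Dict.getD_insert]
          split
          · rename_i he
            rw [Prod.mk.injEq] at he
            obtain ⟨h1, h2⟩ := he
            subst h1; subst h2
            exact QI_tail (hI.2.1 _ _) hq2
          · exact QI_add (hI.2.1 t h) i2
        · intro t h
          exact QI_add (hI.2.2 t h) i2
      · -- only the id queue has a candidate: i1
        have hl1 := clean_head_least (hI.1 (dget fv "violation_id")) hq1
        have hfind : List.find? (fun j => !st.matched.contains j && mB (fd fv) (kd known j)) (PySem.List.pyRange 0 (known.length : Int)) = some i1 := by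
          apply find?_eq_some_of_least (PySem.List.pairwise_lt_pyRange_one _ _) hl1.1.1
          · rw [hq_iff]
            exact ⟨hl1.2.1, (mB_case1 hfid hft).mpr (Or.inl hl1.1.2.1)⟩
          · intro j hj hpj
            rw [hq_iff] at hpj
            obtain ⟨hjS, hjm⟩ := hpj
            rcases (mB_case1 hfid hft).mp hjm with h | h
            · exact hl1.2.2 j ⟨hj, h, hfid⟩ hjS
            · exact (clean_nil_no_match (hI.2.1 _ _) hq2 j ⟨hj, h.1, h.2.1, h.2.2, hft.1, hft.2⟩ hjS).elim
        rw [hfind]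
        dsimp only
        refine ⟨rfl, rfl, ?_, ?_, ?_⟩
        · intro s
          rw [PySem.Dict.getD_insert]
          split
          · rename_i h
            subst h
            exact QI_tail (hI.1 _) hq1
          · exact QI_add (hI.1 s) i1
        · intro t h
          rw [PySem.Dict.getD_insert]
          split
          · rename_i he
            rw [Prod.mk.injEq] at he
            obtain ⟨h1, h2⟩ := he
            subst h1; subst h2
            have := QI_clean (hI.2.1 (dget fv "type") (PySem.Str.strip (dget fv "element_html")))
            rw [hq2] at this
            exact QI_add this i1
          · exact QI_add (hI.2.1 t h) i1
        · intro t h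
          exact QI_add (hI.2.2 t h) i1
      · -- both queues have candidates: take the earlier index
        have hl1 := clean_head_least (hI.1 (dget fv "violation_id")) hq1
        have hl2 := clean_head_least (hI.2.1 (dget fv "type") (PySem.Str.strip (dget fv "element_html"))) hq2
        by_cases hlt : i1 < i2
        · dsimp only
          rw [if_pos hlt]
          have hfind : List.find? (fun j => !st.matched.contains j && mB (fd fv) (kd known j)) (PySem.List.pyRange 0 (known.length : Int)) = some i1 := by
            apply find?_eq_some_of_least (PySem.List.pairwise_lt_pyRange_one _ _) hl1.1.1
            · rw [hq_iff]
              exact ⟨hl1.2.1, (mB_case1 hfid hft).mpr (Or.inl hl1.1.2.1)⟩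
            · intro j hj hpj
              rw [hq_iff] at hpj
              obtain ⟨hjS, hjm⟩ := hpj
              rcases (mB_case1 hfid hft).mp hjm with h | h
              · exact hl1.2.2 j ⟨hj, h, hfid⟩ hjS
              · exact le_of_lt (lt_of_lt_of_le hlt (hl2.2.2 j ⟨hj, h.1, h.2.1, h.2.2, hft.1, hft.2⟩ hjS))
          rw [hfind]
          dsimp only
          refine ⟨rfl, rfl, ?_, ?_, ?_⟩
          · intro s
            rw [PySem.Dict.getD_insert]
            split
            · rename_i h
              subst h
              exact QI_tail (hI.1 _) hq1
            · exact QI_add (hI.1 s) i1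
          · intro t h
            rw [PySem.Dict.getD_insert]
            split
            · rename_i he
              rw [Prod.mk.injEq] at he
              obtain ⟨h1, h2⟩ := he
              subst h1; subst h2
              have := QI_clean (hI.2.1 (dget fv "type") (PySem.Str.strip (dget fv "element_html")))
              rw [hq2] at this
              exact QI_add this i1
            · exact QI_add (hI.2.1 t h) i1
          · intro t h
            exact QI_add (hI.2.2 t h) i1
        · dsimp only
          rw [if_neg hlt]
          have hle : i2 ≤ i1 := le_of_not_gt hlt
          have hfind : List.find? (fun j => !st.matched.contains j && mB (fd fv) (kd known j)) (PySem.List.pyRange 0 (known.length : Int)) = some i2 := by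
            apply find?_eq_some_of_least (PySem.List.pairwise_lt_pyRange_one _ _) hl2.1.1
            · rw [hq_iff]
              exact ⟨hl2.2.1, (mB_case1 hfid hft).mpr (Or.inr ⟨hl2.1.2.1, hl2.1.2.2.1, hl2.1.2.2.2.1⟩)⟩
            · intro j hj hpj
              rw [hq_iff] at hpj
              obtain ⟨hjS, hjm⟩ := hpj
              rcases (mB_case1 hfid hft).mp hjm with h | h
              · exact le_trans hle (hl1.2.2 j ⟨hj, h, hfid⟩ hjS)
              · exact hl2.2.2 j ⟨hj, h.1, h.2.1, h.2.2, hft.1, hft.2⟩ hjS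
          rw [hfind]
          dsimp only
          refine ⟨rfl, rfl, ?_, ?_, ?_⟩
          · intro s
            rw [PySem.Dict.getD_insert]
            split
            · rename_i h
              subst h
              have := QI_clean (hI.1 (dget fv "violation_id"))
              rw [hq1] at this
              exact QI_add this i2
            · exact QI_add (hI.1 s) i2
          · intro t h
            rw [PySem.Dict.getD_insert]
            split
            · rename_i he
              rw [Prod.mk.injEq] at he
              obtain ⟨h1, h2⟩ := he
              subst h1; subst h2
              exact QI_tail (hI.2.1 _ _) hq2
            · exact QI_add (hI.2.1 t h) i2
          · intro t h
            exact QI_add (hI.2.2 t h) i2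
    · -- id present but no usable (type, html): only the id queue
      simp only [bStep]
      rw [if_pos hfid, if_neg hft]
      rcases hq1 : clean st.matched (st.byId.getD (dget fv "violation_id") []) with _ | ⟨i1, t1⟩
      · have hfind : List.find? (fun j => !st.matched.contains j && mB (fd fv) (kd known j)) (PySem.List.pyRange 0 (known.length : Int)) = none := by
          apply List.find?_eq_none.mpr
          intro j hj hpj
          rw [hq_iff] at hpj
          obtain ⟨hjS, hjm⟩ := hpj
          exact clean_nil_no_match (hI.1 (dget fv "violation_id")) hq1 j ⟨hj, (mB_case2 hfid hft).mp hjm, hfid⟩ hjS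
        rw [hfind]
        dsimp only
        refine ⟨rfl, rfl, ?_, hI.2.1, hI.2.2⟩
        intro s
        rw [PySem.Dict.getD_insert]
        split
        · rename_i h
          subst h
          have := QI_clean (hI.1 (dget fv "violation_id"))
          rw [hq1] at this
          exact this
        · exact hI.1 s
      · have hl1 := clean_head_least (hI.1 (dget fv "violation_id")) hq1
        have hfind : List.find? (fun j => !st.matched.contains j && mB (fd fv) (kd known j)) (PySem.List.pyRange 0 (known.length : Int)) = some i1 := by
          apply find?_eq_some_of_least (PySem.List.pairwise_lt_pyRange_one _ _) hl1.1.1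
          · rw [hq_iff]
            exact ⟨hl1.2.1, (mB_case2 hfid hft).mpr hl1.1.2.1⟩
          · intro j hj hpj
            rw [hq_iff] at hpj
            obtain ⟨hjS, hjm⟩ := hpj
            exact hl1.2.2 j ⟨hj, (mB_case2 hfid hft).mp hjm, hfid⟩ hjS
        rw [hfind]
        dsimp only
        refine ⟨rfl, rfl, ?_, ?_, ?_⟩
        · intro s
          rw [PySem.Dict.getD_insert]
          split
          · rename_i h
            subst h
            exact QI_tail (hI.1 _) hq1
          · exact QI_add (hI.1 s) i1
        · intro t h
          exact QI_add (hI.2.1 t h) i1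
        · intro t h
          exact QI_add (hI.2.2 t h) i1
  · -- no id on the found side
    have hfe : dget fv "violation_id" = "" := not_not.mp hfid
    by_cases hft : dget fv "type" ≠ "" ∧ PySem.Str.strip (dget fv "element_html") ≠ ""
    · simp only [bStep]
      rw [if_neg hfid, if_pos hft]
      rcases hq3 : clean st.matched (st.byA.getD (dget fv "type", PySem.Str.strip (dget fv "element_html")) []) with _ | ⟨i3, t3⟩
      · have hfind : List.find? (fun j => !st.matched.contains j && mB (fd fv) (kd known j)) (PySem.List.pyRange 0 (known.length : Int)) = none := by
          apply List.find?_eq_none.mpr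
          intro j hj hpj
          rw [hq_iff] at hpj
          obtain ⟨hjS, hjm⟩ := hpj
          obtain ⟨h1, h2⟩ := (mB_case3 hfe hft).mp hjm
          exact clean_nil_no_match (hI.2.2 _ _) hq3 j ⟨hj, h1, h2, hft.1, hft.2⟩ hjS
        rw [hfind]
        dsimp only
        refine ⟨rfl, rfl, hI.1, hI.2.1, ?_⟩
        intro t h
        rw [PySem.Dict.getD_insert]
        split
        · rename_i he
          rw [Prod.mk.injEq] at he
          obtain ⟨h1, h2⟩ := he
          subst h1; subst h2
          have := QI_clean (hI.2.2 (dget fv "type") (PySem.Str.strip (dget fv "element_html")))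
          rw [hq3] at this
          exact this
        · exact hI.2.2 t h
      · have hl3 := clean_head_least (hI.2.2 (dget fv "type") (PySem.Str.strip (dget fv "element_html"))) hq3
        have hfind : List.find? (fun j => !st.matched.contains j && mB (fd fv) (kd known j)) (PySem.List.pyRange 0 (known.length : Int)) = some i3 := by
          apply find?_eq_some_of_least (PySem.List.pairwise_lt_pyRange_one _ _) hl3.1.1
          · rw [hq_iff]
            exact ⟨hl3.2.1, (mB_case3 hfe hft).mpr ⟨hl3.1.2.1, hl3.1.2.2.1⟩⟩
          · intro j hj hpj
            rw [hq_iff] at hpj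
            obtain ⟨hjS, hjm⟩ := hpj
            obtain ⟨h1, h2⟩ := (mB_case3 hfe hft).mp hjm
            exact hl3.2.2 j ⟨hj, h1, h2, hft.1, hft.2⟩ hjS
        rw [hfind]
        dsimp only
        refine ⟨rfl, rfl, ?_, ?_, ?_⟩
        · intro s
          exact QI_add (hI.1 s) i3
        · intro t h
          exact QI_add (hI.2.1 t h) i3
        · intro t h
          rw [PySem.Dict.getD_insert]
          split
          · rename_i he
            rw [Prod.mk.injEq] at he
            obtain ⟨h1, h2⟩ := he
            subst h1; subst h2
            exact QI_tail (hI.2.2 _ _) hq3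
          · exact QI_add (hI.2.2 t h) i3
    · -- nothing to match on
      simp only [bStep]
      rw [if_neg hfid, if_neg hft]
      have hfind : List.find? (fun j => !st.matched.contains j && mB (fd fv) (kd known j)) (PySem.List.pyRange 0 (known.length : Int)) = none := by
        apply List.find?_eq_none.mpr
        intro j hj hpj
        rw [hq_iff] at hpj
        rw [mB_case4 hfe hft] at hpj
        exact absurd hpj.2 (by simp)
      rw [hfind]
      exact ⟨rfl, rfl, hI⟩


lemma fold_agree (known : List (List (String × String))) :
    ∀ (found : List (List (String × String))) (st : BSt),
    DInv known st.matched st.byId st.byE st.byA →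
    (found.foldl bStep st).matched = (found.foldl (fun (acc : PySem.Set Int × Int) fv => aScan fv (dget fv "violation_id") (PySem.List.enumerate known 0) acc.1 acc.2) (st.matched, st.tp)).1 ∧
    (found.foldl bStep st).tp = (found.foldl (fun (acc : PySem.Set Int × Int) fv => aScan fv (dget fv "violation_id") (PySem.List.enumerate known 0) acc.1 acc.2) (st.matched, st.tp)).2 ∧
    DInv known (found.foldl bStep st).matched (found.foldl bStep st).byId (found.foldl bStep st).byE (found.foldl bStep st).byA := by
  intro found
  induction found with
  | nil =>
    intro st h
    exact ⟨rfl, rfl, h⟩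
  | cons fv rest ih =>
    intro st h
    obtain ⟨h1, h2, h3⟩ := step_agree known fv st h
    rw [List.foldl_cons, List.foldl_cons]
    dsimp only
    have hP : (aScan fv (dget fv "violation_id") (PySem.List.enumerate known 0) st.matched st.tp) = ((bStep st fv).matched, (bStep st fv).tp) := by
      rw [h1, h2]
    rw [hP]
    exact ih (bStep st fv) h3

lemma afold_nil (found : List (List (String × String))) (acc : PySem.Set Int × Int) :
    found.foldl (fun (acc : PySem.Set Int × Int) fv => aScan fv (dget fv "violation_id") (PySem.List.enumerate ([] : List (List (String × String))) 0) acc.1 acc.2) acc = acc := by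
  induction found generalizing acc with
  | nil => rfl
  | cons fv rest ih =>
    rw [List.foldl_cons]
    exact ih _

theorem match_violations_spec : Claim_equal_match_violations := by
  unfold Claim_equal_match_violations
  intro found known _
  unfold Spec_match_violations match_violations match_violations_alt
  have hmain := fold_agree known found
    ⟨((PySem.List.enumerate known 0).foldl bBuild (PySem.Dict.empty, PySem.Dict.empty, PySem.Dict.empty)).1,
     ((PySem.List.enumerate known 0).foldl bBuild (PySem.Dict.empty, PySem.Dict.empty, PySem.Dict.empty)).2.1,
     ((PySem.List.enumerate known 0).foldl bBuild (PySem.Dict.empty, PySem.Dict.empty, PySem.Dict.empty)).2.2,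
     PySem.Set.empty, 0⟩ (DInv_init known)
  dsimp only at hmain ⊢
  by_cases hf : found = []
  · subst hf
    by_cases hk : known = []
    · subst hk
      norm_num
    · rw [if_neg (by simp [hk]), if_pos rfl]
      norm_num
  · by_cases hk : known = []
    · subst hk
      rw [if_neg (by simp [hf]), if_neg hf, if_pos rfl]
      rw [hmain.2.1, afold_nil]
      norm_num
    · rw [if_neg (by simp [hf]), if_neg hf, if_neg hk]
      rw [hmain.2.1]
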